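-- pv_equiv track=rewrite | github.com/savsher/freecell | run.py | fit_two
-- ===== SOURCE A (Python) =====
-- mn = 13
--
-- KINGS = [i for i in range(1, 53) if i % mn == 13]
--
-- def fit_two(card, card2):
--     """ Check two cards for compability """
--     if card in KINGS:
--         return False
--     suit = (card-1)//mn
--     fit_suit = ((suit+1)%4, (suit+3)%4)
--     fit_cards = [i for i in range(1, 53) if (i % mn == (card+1) % mn) and ((i-1)//mn in fit_suit)]
--     if card2 in fit_cards:
--         return True
--     return False
-- ===== SOURCE B (Python) =====
-- def fit_two(card, card2):
--     """ Check two cards for compability """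
--     suit = (card - 1) // 13
--     return card2 % 13 == (card + 1) % 13 and (card2 - 1) // 13 in ((suit + 1) % 4, (suit + 3) % 4)
-- ===== Notes on version B (the rewrite author's own statement) =====
-- stated objective: simpler
-- what changed: Drops the dead KINGS guard and replaces building the 52-element candidate list plus a membership test with a single closed-form boolean over the same rank/suit arithmetic.
import Mathlib
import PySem

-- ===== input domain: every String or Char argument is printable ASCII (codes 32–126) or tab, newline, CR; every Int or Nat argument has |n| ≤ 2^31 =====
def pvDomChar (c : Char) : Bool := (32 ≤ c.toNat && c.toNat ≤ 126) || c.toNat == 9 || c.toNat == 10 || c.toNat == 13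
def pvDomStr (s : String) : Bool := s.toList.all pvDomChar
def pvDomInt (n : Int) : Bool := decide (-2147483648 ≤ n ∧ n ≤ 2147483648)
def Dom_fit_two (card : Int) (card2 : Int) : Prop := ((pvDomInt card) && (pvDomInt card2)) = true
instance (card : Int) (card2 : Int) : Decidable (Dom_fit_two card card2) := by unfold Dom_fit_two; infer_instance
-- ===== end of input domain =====

-- B replaces A's build-a-candidate-list-then-membership-test with a direct closed-form boolean test (simpler, no list construction).

-- ===== PORT A =====
-- module-level constant KINGS = [i for i in range(1, 53) if i % 13 == 13]
def pvKINGS : List Int := (PySem.List.pyRange 1 53 1).filter (fun i => PySem.Int.mod i 13 == 13)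

def fit_two (card : Int) (card2 : Int) : Bool :=
  if pvKINGS.contains card then false
  else
    let suit := PySem.Int.floordiv (card - 1) 13
    let fit_suit : Int × Int := (PySem.Int.mod (suit + 1) 4, PySem.Int.mod (suit + 3) 4)
    let fit_cards := (PySem.List.pyRange 1 53 1).filter
      (fun i => PySem.Int.mod i 13 == PySem.Int.mod (card + 1) 13 &&
        (PySem.Int.floordiv (i - 1) 13 == fit_suit.1 || PySem.Int.floordiv (i - 1) 13 == fit_suit.2))
    if fit_cards.contains card2 then true else false

-- ===== PORT B =====
def fit_two_alt (card : Int) (card2 : Int) : Bool :=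
  let suit := PySem.Int.floordiv (card - 1) 13
  PySem.Int.mod card2 13 == PySem.Int.mod (card + 1) 13 &&
    (PySem.Int.floordiv (card2 - 1) 13 == PySem.Int.mod (suit + 1) 4 ||
     PySem.Int.floordiv (card2 - 1) 13 == PySem.Int.mod (suit + 3) 4)

-- ===== PRECONDITION & SPEC =====
def Spec_fit_two (card : Int) (card2 : Int) (out : Bool) : Prop := out = fit_two_alt card card2
instance (card : Int) (card2 : Int) (out : Bool) : Decidable (Spec_fit_two card card2 out) := by unfold Spec_fit_two; infer_instance

-- ===== CLAIM (what is proved, stated in full; the proofs are below) =====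
def Claim_equal_fit_two : Prop := ∀ (card : Int) (card2 : Int), Dom_fit_two card card2 → Spec_fit_two card card2 (fit_two card card2)

-- ===== LEMMAS AND PROOFS =====
theorem pvKINGS_nil : pvKINGS = [] := by decide

-- ===== VERDICT (by name: the statement is the Claim_ definition above) =====
theorem fit_two_spec : Claim_equal_fit_two := by
  intro card card2 _
  unfold Spec_fit_two fit_two fit_two_alt
  rw [pvKINGS_nil]
  simp only [List.contains_nil, Bool.false_eq_true, if_false]
  simp only [List.contains_iff_mem, List.mem_filter, PySem.List.mem_pyRange_one]
  by_cases hp : (PySem.Int.mod card2 13 == PySem.Int.mod (card + 1) 13 &&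
      (PySem.Int.floordiv (card2 - 1) 13 == PySem.Int.mod (PySem.Int.floordiv (card - 1) 13 + 1) 4 ||
       PySem.Int.floordiv (card2 - 1) 13 == PySem.Int.mod (PySem.Int.floordiv (card - 1) 13 + 3) 4)) = true
  · have hb : 1 ≤ card2 ∧ card2 < 53 := by
      have h2 := hp
      simp only [Bool.and_eq_true, Bool.or_eq_true, beq_iff_eq] at h2
      rcases h2.2 with h3 | h3 <;>
        · rw [PySem.Int.floordiv_eq_ediv_of_pos (by norm_num : (0:Int) < 13),
              PySem.Int.mod_eq_emod_of_pos (by norm_num : (0:Int) < 4)] at h3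
          omega
    simp [hb.1, hb.2, Bool.beq_eq_decide_eq]
  · simp only [Bool.not_eq_true] at hp
    simp [Bool.beq_eq_decide_eq]
    intro _ h3
    rcases h3 with h3 | h3 <;> omega
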